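-- pv_equiv track=rewrite | github.com/junhuijh/ftree-vis | Assignment1.py | next_label
-- ===== SOURCE A (Python) =====
-- def next_label(s):
--     s = list(s)
--     i = len(s) - 1
--     while i >= 0:
--         if s[i] != 'Z':
--             s[i] = chr(ord(s[i]) + 1)
--             return ''.join(s)
--         s[i] = 'A'
--         i -= 1
--     return 'A' + ''.join(s)
-- ===== SOURCE B (Python) =====
-- def next_label(s):
--     if not s:
--         return 'A'
--     if s[-1] != 'Z':
--         return s[:-1] + chr(ord(s[-1]) + 1)
--     return next_label(s[:-1]) + 'A'
-- ===== Notes on version B (the rewrite author's own statement) =====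
-- stated objective: simpler
-- what changed: Replaces the mutable char list with a decreasing index and join by a direct recursion on the string's prefix that strips trailing 'Z's and appends 'A's.
import Mathlib
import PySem

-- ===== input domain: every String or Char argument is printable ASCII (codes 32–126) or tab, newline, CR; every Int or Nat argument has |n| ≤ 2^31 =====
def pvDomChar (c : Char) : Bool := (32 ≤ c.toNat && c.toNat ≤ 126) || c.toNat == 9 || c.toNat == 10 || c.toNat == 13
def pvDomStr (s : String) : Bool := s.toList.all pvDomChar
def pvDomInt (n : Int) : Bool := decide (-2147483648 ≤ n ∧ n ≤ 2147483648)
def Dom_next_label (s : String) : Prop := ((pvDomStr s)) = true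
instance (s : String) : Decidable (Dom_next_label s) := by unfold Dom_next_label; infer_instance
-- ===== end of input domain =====

-- B replaces A's mutable char list and rightward index loop by a direct recursion on the
-- string's prefix (strip trailing 'Z's, append 'A's); same return value, simpler decomposition.

-- ===== PORT A =====
-- A's while loop over index i, walking the list from the right: the first argument is the
-- not-yet-visited prefix s[0..i] REVERSED (head = s[i]); the second is the already-processed
-- suffix (each visited 'Z' turned into 'A').
def next_label_loopA : List Char → List Char → List Char
  | [], suf => 'A' :: suf                              -- i < 0: return 'A' + ''.join(s)
  | c :: rest, suf =>
    if c ≠ 'Z' then rest.reverse ++ Char.ofNat (c.toNat + 1) :: suf   -- s[i] = chr(ord(s[i])+1); join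
    else next_label_loopA rest ('A' :: suf)            -- s[i] = 'A'; i -= 1

def next_label (s : String) : String :=
  String.ofList (next_label_loopA s.toList.reverse [])

-- ===== PORT B =====
-- B's recursion on the prefix: base 'A'; last char not 'Z' → increment it; else recurse on s[:-1], append 'A'.
def next_label_altCore (cs : List Char) : List Char :=
  if h : cs = [] then ['A']
  else
    let c := cs.getLast h
    if c ≠ 'Z' then cs.dropLast ++ [Char.ofNat (c.toNat + 1)]
    else next_label_altCore cs.dropLast ++ ['A']
termination_by cs.length
decreasing_by
  simpa [List.length_dropLast] using Nat.sub_lt (List.length_pos_iff.mpr h) one_pos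

def next_label_alt (s : String) : String := String.ofList (next_label_altCore s.toList)

-- ===== PRECONDITION & SPEC =====
def Spec_next_label (s : String) (out : String) : Prop := out = next_label_alt s
instance (s : String) (out : String) : Decidable (Spec_next_label s out) := by unfold Spec_next_label; infer_instance

-- ===== CLAIM (what is proved, stated in full; the proofs are below) =====
def Claim_equal_next_label : Prop := ∀ (s : String), Dom_next_label s → Spec_next_label s (next_label s)

-- ===== LEMMAS AND PROOFS =====
theorem loopA_eq_altCore (cs suf : List Char) :
    next_label_loopA cs.reverse suf = next_label_altCore cs ++ suf := by
  induction cs using List.reverseRecOn generalizing suf with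
  | nil => simp [next_label_loopA, next_label_altCore]
  | append_singleton init c ih =>
    rw [next_label_altCore]
    by_cases hc : c = 'Z'
    · subst hc
      simp [next_label_loopA, List.reverse_append, ih]
    · simp [next_label_loopA, List.reverse_append, hc]

-- ===== VERDICT (by name: the statement is the Claim_ definition above) =====
theorem next_label_spec : Claim_equal_next_label := by
  intro s _
  unfold Spec_next_label next_label next_label_alt
  rw [loopA_eq_altCore, List.append_nil]
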